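-- pv_equiv track=rewrite | github.com/AsteriskAmpersand/Material-Editing | MaterialListing.py | sibling_compendium
-- ===== SOURCE A (Python) =====
-- def sibling_compendium(compendium, idcompendium):
--     found = set()
--     sibling_names = {}
--     for mb in compendium:
--         if mb in found:
--                 continue
--         found.update([mb])
--         sibling_names[mb]=[]
--         for ms in compendium:
--             if ms in found:
--                 continue
--             if len(compendium[mb].intersection(compendium[ms]))!=0:
--                 found.update([ms])
--                 sibling_names[mb].append(ms)
--
--     sibling_id = {}
--     for mb in idcompendium:
--         if mb in found:
--                 continue
--         found.update([mb])
--         sibling_id[mb]=[]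
--         for ms in idcompendium:
--             if ms in found:
--                 continue
--             if len(idcompendium[mb].intersection(idcompendium[ms]))!=0:
--                 found.update([ms])
--                 sibling_id[mb].append(ms)
--     return sibling_names, sibling_id
-- ===== SOURCE B (Python) =====
-- def sibling_compendium(compendium, idcompendium):
--     found = set()
--
--     def phase(comp):
--         # inverted index: element -> keys whose set contains it (in key order)
--         index = {}
--         for k, v in comp.items():
--             for e in v:
--                 index.setdefault(e, []).append(k)
--         groups = {}
--         for mb, vb in comp.items():
--             if mb in found:
--                 continue
--             found.add(mb)
--             cands = set()
--             for e in vb: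
--                 cands.update(index.get(e, ()))
--             sibs = [ms for ms in comp if ms in cands and ms not in found]
--             found.update(sibs)
--             groups[mb] = sibs
--         return groups
--
--     return phase(compendium), phase(idcompendium)
-- ===== Notes on version B (the rewrite author's own statement) =====
-- stated objective: faster
-- what changed: B replaces A's per-pair set intersections (every base scanned against every other key with an intersection test) by an inverted index element->keys built once per dict; each base unions the buckets of its own elements into a candidate set and then filters the key order by candidate membership, so no pairwise intersection is ever computed.
import Mathlib
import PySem

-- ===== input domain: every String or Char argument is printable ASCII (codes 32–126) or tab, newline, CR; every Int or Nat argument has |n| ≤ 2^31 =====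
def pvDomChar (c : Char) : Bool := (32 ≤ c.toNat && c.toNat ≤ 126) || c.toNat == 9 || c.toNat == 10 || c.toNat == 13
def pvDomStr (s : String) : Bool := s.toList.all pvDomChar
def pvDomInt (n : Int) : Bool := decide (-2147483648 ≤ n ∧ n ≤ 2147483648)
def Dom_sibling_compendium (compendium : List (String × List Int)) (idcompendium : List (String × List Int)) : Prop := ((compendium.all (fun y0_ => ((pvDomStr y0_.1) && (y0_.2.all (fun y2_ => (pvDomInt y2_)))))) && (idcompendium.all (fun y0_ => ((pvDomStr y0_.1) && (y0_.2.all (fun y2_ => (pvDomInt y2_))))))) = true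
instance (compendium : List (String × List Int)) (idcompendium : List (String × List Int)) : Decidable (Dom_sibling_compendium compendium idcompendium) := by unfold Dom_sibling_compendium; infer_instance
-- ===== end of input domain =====

-- B replaces A's pairwise set-intersection scans by a per-dict inverted index (element -> keys)
-- whose buckets are unioned per base and filtered in key order; proved equal on duplicate-free
-- key lists (the association-list encodings of Python dicts).

-- ===== PORT A =====
-- len(compendium[mb].intersection(compendium[ms])) != 0
def pvInterTest (vb vs : List Int) : Bool :=
  PySem.Set.len (PySem.Set.inter (PySem.Set.ofList vb) vs) != 0

-- inner 'for ms in compendium' loop of A; state = (found, sibling list of the current base)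
def pvInnerA (vb : List Int) (comp : List (String × List Int))
    (st : PySem.Set String × List String) : PySem.Set String × List String :=
  comp.foldl (fun st q =>
    if PySem.Set.contains st.1 q.1 then st
    else if pvInterTest vb q.2 then (PySem.Set.add st.1 q.1, st.2 ++ [q.1]) else st) st

-- body of the outer 'for mb in compendium' loop of A; state = (sibling dict, found)
def pvStepA (comp : List (String × List Int))
    (st : PySem.Dict String (List String) × PySem.Set String) (p : String × List Int) :
    PySem.Dict String (List String) × PySem.Set String :=
  if PySem.Set.contains st.2 p.1 then st
  else
    let f := PySem.Set.add st.2 p.1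
    let r := pvInnerA p.2 comp (f, [])
    (PySem.Dict.insert st.1 p.1 r.2, r.1)

def pvPhaseA (comp : List (String × List Int)) (found : PySem.Set String) :
    PySem.Dict String (List String) × PySem.Set String :=
  comp.foldl (pvStepA comp) (PySem.Dict.empty, found)

def sibling_compendium (compendium : List (String × List Int)) (idcompendium : List (String × List Int)) : (List (String × List String)) × (List (String × List String)) :=
  let r1 := pvPhaseA compendium PySem.Set.empty
  let r2 := pvPhaseA idcompendium r1.2
  (r1.1.items, r2.1.items)

-- ===== PORT B =====
-- inverted index: element -> list of keys whose set contains it, in key order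
def pvIndex (comp : List (String × List Int)) : PySem.Dict Int (List String) :=
  comp.foldl (fun idx p =>
    p.2.foldl (fun idx e => PySem.Dict.insert idx e (PySem.Dict.getD idx e [] ++ [p.1])) idx)
    PySem.Dict.empty

-- cands = union of the buckets of the base's own elements
def pvCands (idx : PySem.Dict Int (List String)) (vb : List Int) : PySem.Set String :=
  vb.foldl (fun c e => PySem.Set.update c (PySem.Dict.getD idx e [])) PySem.Set.empty

-- body of B's 'for mb, vb in comp.items()' loop
def pvStepB (comp : List (String × List Int)) (idx : PySem.Dict Int (List String))
    (st : PySem.Dict String (List String) × PySem.Set String) (p : String × List Int) :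
    PySem.Dict String (List String) × PySem.Set String :=
  if PySem.Set.contains st.2 p.1 then st
  else
    let f := PySem.Set.add st.2 p.1
    let cands := pvCands idx p.2
    let sibs := (comp.map Prod.fst).filter
      (fun ms => PySem.Set.contains cands ms && !(PySem.Set.contains f ms))
    (PySem.Dict.insert st.1 p.1 sibs, PySem.Set.update f sibs)

def pvPhaseB (comp : List (String × List Int)) (found : PySem.Set String) :
    PySem.Dict String (List String) × PySem.Set String :=
  let idx := pvIndex comp
  comp.foldl (pvStepB comp idx) (PySem.Dict.empty, found)

def sibling_compendium_alt (compendium : List (String × List Int)) (idcompendium : List (String × List Int)) : (List (String × List String)) × (List (String × List String)) :=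
  let r1 := pvPhaseB compendium PySem.Set.empty
  let r2 := pvPhaseB idcompendium r1.2
  (r1.1.items, r2.1.items)

-- ===== PRECONDITION & SPEC =====
-- Pre_ requires duplicate-free key lists: both arguments are Python dicts, and an association
-- list with a duplicate key does not encode any dict input of A.
def Pre_sibling_compendium (compendium : List (String × List Int)) (idcompendium : List (String × List Int)) : Prop :=
  (compendium.map Prod.fst).Nodup ∧ (idcompendium.map Prod.fst).Nodup
instance (compendium : List (String × List Int)) (idcompendium : List (String × List Int)) : Decidable (Pre_sibling_compendium compendium idcompendium) := by unfold Pre_sibling_compendium; infer_instance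

def pvWitness_sibling_compendium : (List (String × List Int)) × (List (String × List Int)) :=
  ([("a", [1, 2]), ("b", [2]), ("c", [5])], [("c", [3]), ("d", [3])])

def Spec_sibling_compendium (compendium : List (String × List Int)) (idcompendium : List (String × List Int)) (out : (List (String × List String)) × (List (String × List String))) : Prop := out = sibling_compendium_alt compendium idcompendium
instance (compendium : List (String × List Int)) (idcompendium : List (String × List Int)) (out : (List (String × List String)) × (List (String × List String))) : Decidable (Spec_sibling_compendium compendium idcompendium out) := by unfold Spec_sibling_compendium; infer_instance

-- ===== CLAIM (what is proved, stated in full; the proofs are below) =====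
def Claim_equal_sibling_compendium : Prop := ∀ (compendium : List (String × List Int)) (idcompendium : List (String × List Int)), Dom_sibling_compendium compendium idcompendium → Pre_sibling_compendium compendium idcompendium → Spec_sibling_compendium compendium idcompendium (sibling_compendium compendium idcompendium)

-- ===== LEMMAS AND PROOFS =====

-- A's intersection test is "some element of vb lies in vs"
theorem pvInterTest_iff (vb vs : List Int) :
    pvInterTest vb vs = true ↔ ∃ e, e ∈ vb ∧ e ∈ vs := by
  unfold pvInterTest
  rw [PySem.Set.len_eq]
  simp only [bne_iff_ne, ne_eq, Nat.cast_eq_zero, List.length_eq_zero_iff]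
  constructor
  · intro h
    obtain ⟨x, hx⟩ := List.exists_mem_of_ne_nil _ h
    exact ⟨x, by simpa [PySem.Set.mem_inter, PySem.Set.mem_ofList] using
      (PySem.Set.mem_inter (PySem.Set.ofList vb) vs x).mp hx⟩
  · rintro ⟨e, h1, h2⟩ hnil
    have : e ∈ (PySem.Set.ofList vb).inter vs :=
      (PySem.Set.mem_inter _ _ e).mpr ⟨(PySem.Set.mem_ofList vb e).mpr h1, h2⟩
    simp [hnil] at this

-- membership in one bucket after indexing a single entry's element list
theorem pvIndexInner_mem (k : String) (v : List Int) :
    ∀ (idx : PySem.Dict Int (List String)) (e : Int) (x : String),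
      x ∈ PySem.Dict.getD (v.foldl (fun idx e => PySem.Dict.insert idx e (PySem.Dict.getD idx e [] ++ [k])) idx) e []
        ↔ x ∈ PySem.Dict.getD idx e [] ∨ (e ∈ v ∧ x = k) := by
  induction v with
  | nil => simp
  | cons a v ih =>
    intro idx e x
    rw [List.foldl_cons, ih]
    rw [PySem.Dict.getD_insert]
    by_cases he : e = a
    · subst he; simp; tauto
    · simp [he]

-- membership in an index bucket
theorem pvIndex_mem (comp : List (String × List Int)) (e : Int) (x : String) :
    x ∈ PySem.Dict.getD (pvIndex comp) e [] ↔ ∃ q ∈ comp, q.1 = x ∧ e ∈ q.2 := by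
  unfold pvIndex
  have main : ∀ (l : List (String × List Int)) (idx : PySem.Dict Int (List String)),
      x ∈ PySem.Dict.getD (l.foldl (fun idx p => p.2.foldl (fun idx e => PySem.Dict.insert idx e (PySem.Dict.getD idx e [] ++ [p.1])) idx) idx) e []
        ↔ x ∈ PySem.Dict.getD idx e [] ∨ ∃ q ∈ l, q.1 = x ∧ e ∈ q.2 := by
    intro l
    induction l with
    | nil => simp
    | cons p l ih =>
      intro idx
      rw [List.foldl_cons, ih, pvIndexInner_mem]
      constructor
      · rintro (⟨h | ⟨h1, h2⟩⟩ | ⟨q, hq, h1, h2⟩)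
        · exact Or.inl h
        · exact Or.inr ⟨p, List.mem_cons_self, h2.symm, h1⟩
        · exact Or.inr ⟨q, List.mem_cons_of_mem _ hq, h1, h2⟩
      · rintro (h | ⟨q, hq, h1, h2⟩)
        · exact Or.inl (Or.inl h)
        · rcases List.mem_cons.mp hq with rfl | hq
          · exact Or.inl (Or.inr ⟨h2, h1.symm⟩)
          · exact Or.inr ⟨q, hq, h1, h2⟩
  rw [main]
  simp [PySem.Dict.empty, PySem.Dict.getD, PySem.Dict.get?]

-- membership in the union of the buckets of vb's elements
theorem pvCands_mem (comp : List (String × List Int)) (vb : List Int) (x : String) :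
    x ∈ pvCands (pvIndex comp) vb ↔ ∃ e ∈ vb, ∃ q ∈ comp, q.1 = x ∧ e ∈ q.2 := by
  unfold pvCands
  have main : ∀ (v : List Int) (c : PySem.Set String),
      x ∈ v.foldl (fun c e => PySem.Set.update c (PySem.Dict.getD (pvIndex comp) e [])) c
        ↔ x ∈ c ∨ ∃ e ∈ v, x ∈ PySem.Dict.getD (pvIndex comp) e [] := by
    intro v
    induction v with
    | nil => simp
    | cons a v ih =>
      intro c
      rw [List.foldl_cons, ih, PySem.Set.mem_update]
      constructor
      · rintro (⟨h | h⟩ | ⟨e, he, hx⟩)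
        · exact Or.inl h
        · exact Or.inr ⟨a, List.mem_cons_self, h⟩
        · exact Or.inr ⟨e, List.mem_cons_of_mem _ he, hx⟩
      · rintro (h | ⟨e, he, hx⟩)
        · exact Or.inl (Or.inl h)
        · rcases List.mem_cons.mp he with rfl | he
          · exact Or.inl (Or.inr hx)
          · exact Or.inr ⟨e, he, hx⟩
  rw [main]
  simp [pvIndex_mem, PySem.Set.empty]

-- adding a different key does not change a membership test
theorem contains_add_of_ne (f : PySem.Set String) (a b : String) (h : b ≠ a) :
    PySem.Set.contains (PySem.Set.add f a) b = PySem.Set.contains f b := by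
  rcases hb : PySem.Set.contains f b with _ | _
  · rcases hc : PySem.Set.contains (PySem.Set.add f a) b with _ | _
    · rfl
    · have := (PySem.Set.contains_iff _ _).mp hc
      rcases (PySem.Set.mem_add f a b).mp this with h1 | h1
      · rw [(PySem.Set.contains_iff f b).mpr h1] at hb; exact hb
      · exact absurd h1 h
  · exact (PySem.Set.contains_iff _ _).mpr
      ((PySem.Set.mem_add f a b).mpr (Or.inl ((PySem.Set.contains_iff f b).mp hb)))

-- A's inner loop is a filter of the entry list against the incoming found set
theorem pvInnerA_spec (vb : List Int) :
    ∀ (es : List (String × List Int)) (f : PySem.Set String) (acc : List String),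
      (es.map Prod.fst).Nodup →
      pvInnerA vb es (f, acc) =
        (PySem.Set.update f ((es.filter (fun q => pvInterTest vb q.2 && !(PySem.Set.contains f q.1))).map Prod.fst),
         acc ++ (es.filter (fun q => pvInterTest vb q.2 && !(PySem.Set.contains f q.1))).map Prod.fst) := by
  intro es
  induction es with
  | nil => intro f acc _; simp [pvInnerA, PySem.Set.update]
  | cons q es ih =>
    intro f acc hnd
    rw [List.map_cons, List.nodup_cons] at hnd
    obtain ⟨hq, hnd'⟩ := hnd
    unfold pvInnerA
    rw [List.foldl_cons, List.filter_cons]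
    by_cases hc : PySem.Set.contains f q.1
    · have hcond : (pvInterTest vb q.2 && !PySem.Set.contains f q.1) = false := by
        rw [hc]; simp
      rw [hcond]
      simp only [Bool.false_eq_true, if_neg, not_false_eq_true]
      rw [if_pos (by exact hc)]
      exact ih f acc hnd'
    · rw [if_neg (by exact hc)]
      by_cases ht : pvInterTest vb q.2
      · have hcond : (pvInterTest vb q.2 && !PySem.Set.contains f q.1) = true := by
          rw [ht, Bool.eq_false_iff.mpr hc]; rfl
        rw [if_pos (by exact ht), hcond, if_pos rfl]
        have hrec := ih (PySem.Set.add f q.1) (acc ++ [q.1]) hnd'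
        unfold pvInnerA at hrec
        rw [hrec]
        have hfc : es.filter (fun q' => pvInterTest vb q'.2 && !(PySem.Set.contains (PySem.Set.add f q.1) q'.1))
                 = es.filter (fun q' => pvInterTest vb q'.2 && !(PySem.Set.contains f q'.1)) := by
          apply List.filter_congr
          intro q' hq'
          have hne : q'.1 ≠ q.1 := fun hh => hq (hh ▸ List.mem_map_of_mem hq')
          rw [contains_add_of_ne f q.1 q'.1 hne]
        rw [hfc]
        refine Prod.ext ?_ ?_
        · show PySem.Set.update (PySem.Set.add f q.1) _ = PySem.Set.update f _
          rw [List.map_cons]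
          rfl
        · simp
      · have hcond : (pvInterTest vb q.2 && !PySem.Set.contains f q.1) = false := by
          rw [Bool.eq_false_iff.mpr ht]; rfl
        rw [if_neg (by exact ht), hcond]
        simp only [Bool.false_eq_true, if_neg, not_false_eq_true]
        exact ih f acc hnd'

-- one outer-loop step of A equals one outer-loop step of B
theorem pvStep_eq (comp : List (String × List Int)) (h : (comp.map Prod.fst).Nodup)
    (st : PySem.Dict String (List String) × PySem.Set String) (p : String × List Int) :
    pvStepA comp st p = pvStepB comp (pvIndex comp) st p := by
  unfold pvStepA pvStepB
  by_cases hc : PySem.Set.contains st.2 p.1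
  · rw [if_pos (by exact hc), if_pos (by exact hc)]
  · rw [if_neg (by exact hc), if_neg (by exact hc)]
    have hinner := pvInnerA_spec p.2 comp (PySem.Set.add st.2 p.1) [] h
    have hsibs : ((comp.filter (fun q => pvInterTest p.2 q.2 && !(PySem.Set.contains (PySem.Set.add st.2 p.1) q.1))).map Prod.fst)
               = (comp.map Prod.fst).filter (fun ms => PySem.Set.contains (pvCands (pvIndex comp) p.2) ms && !(PySem.Set.contains (PySem.Set.add st.2 p.1) ms)) := by
      rw [List.filter_map]
      congr 1
      apply List.filter_congr
      intro q hq
      show (pvInterTest p.2 q.2 && !(PySem.Set.contains (PySem.Set.add st.2 p.1) q.1))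
         = (PySem.Set.contains (pvCands (pvIndex comp) p.2) q.1 && !(PySem.Set.contains (PySem.Set.add st.2 p.1) q.1))
      have hcq : PySem.Set.contains (pvCands (pvIndex comp) p.2) q.1 = pvInterTest p.2 q.2 := by
        rw [Bool.eq_iff_iff, PySem.Set.contains_iff, pvCands_mem, pvInterTest_iff]
        constructor
        · rintro ⟨e, he, q', hq', h1, h2⟩
          have heq : q' = q := List.inj_on_of_nodup_map h hq' hq h1
          exact ⟨e, he, heq ▸ h2⟩
        · rintro ⟨e, he, h2⟩
          exact ⟨e, he, q, hq, rfl, h2⟩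
      rw [hcq]
    simp only [hinner]
    rw [hsibs]
    simp

theorem pvPhase_eq (comp : List (String × List Int)) (h : (comp.map Prod.fst).Nodup)
    (found : PySem.Set String) : pvPhaseA comp found = pvPhaseB comp found := by
  unfold pvPhaseA pvPhaseB
  have hs : pvStepA comp = pvStepB comp (pvIndex comp) :=
    funext fun st => funext fun p => pvStep_eq comp h st p
  rw [hs]

-- ===== VERDICT (by name: the statement is the Claim_ definition above) =====
theorem sibling_compendium_spec : Claim_equal_sibling_compendium := by
  intro compendium idcompendium _ hpre
  unfold Spec_sibling_compendium sibling_compendium sibling_compendium_alt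
  have h1 : pvPhaseA compendium = pvPhaseB compendium := funext (pvPhase_eq compendium hpre.1)
  have h2 : pvPhaseA idcompendium = pvPhaseB idcompendium := funext (pvPhase_eq idcompendium hpre.2)
  rw [h1, h2]
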